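-- pv_equiv track=rewrite | github.com/matttang27/GOPSsolver | cpp-solver/reports/common.py | guaranteed
-- ===== SOURCE A (Python) =====
-- def guaranteed(cardsA: tuple[int, ...], cardsB: tuple[int, ...], pointDiff: int, prizes: tuple[int, ...]) -> int:
--     """
--     Check if one side has enough cards higher than the other to guarantee a win.
--     """
--     cardsLeft = len(prizes)
--     sorted_prizes = sorted(prizes, reverse=True)
--     guarantee = [sum(sorted_prizes[:i]) - sum(sorted_prizes[i:]) for i in range(cardsLeft + 1)]
--
--     guaranteeA = sum(1 for card in cardsA if card > cardsB[-1])
--     guaranteeB = sum(1 for card in cardsB if card > cardsA[-1])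
--
--     if (guarantee[guaranteeA] + pointDiff) > 0:
--         return 1
--     elif (pointDiff - guarantee[guaranteeB]) < 0:
--         return -1
--     else:
--         return 0
-- ===== SOURCE B (Python) =====
-- def guaranteed(cardsA, cardsB, pointDiff, prizes):
--     """
--     Check if one side has enough cards higher than the other to guarantee a win.
--     No guarantee table: only the two needed values are accumulated as signed
--     running sums in a single pass over the sorted prizes.
--     """
--     guaranteeA = sum(1 for card in cardsA if card > cardsB[-1])
--     guaranteeB = sum(1 for card in cardsB if card > cardsA[-1])
--
--     valA = 0
--     valB = 0
--     for i, p in enumerate(sorted(prizes, reverse=True)):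
--         valA += p if i < guaranteeA else -p
--         valB += p if i < guaranteeB else -p
--
--     if valA + pointDiff > 0:
--         return 1
--     if pointDiff - valB < 0:
--         return -1
--     return 0
-- ===== Notes on version B (the rewrite author's own statement) =====
-- stated objective: faster
-- what changed: B builds no guarantee table at all: it computes the two card-dominance counts first and then accumulates only the two needed signed prize sums (add while the index is below the count, subtract after) in a single enumerate pass over the sorted prizes, replacing A's O(n^2) list of slice re-sums.
import Mathlib
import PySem

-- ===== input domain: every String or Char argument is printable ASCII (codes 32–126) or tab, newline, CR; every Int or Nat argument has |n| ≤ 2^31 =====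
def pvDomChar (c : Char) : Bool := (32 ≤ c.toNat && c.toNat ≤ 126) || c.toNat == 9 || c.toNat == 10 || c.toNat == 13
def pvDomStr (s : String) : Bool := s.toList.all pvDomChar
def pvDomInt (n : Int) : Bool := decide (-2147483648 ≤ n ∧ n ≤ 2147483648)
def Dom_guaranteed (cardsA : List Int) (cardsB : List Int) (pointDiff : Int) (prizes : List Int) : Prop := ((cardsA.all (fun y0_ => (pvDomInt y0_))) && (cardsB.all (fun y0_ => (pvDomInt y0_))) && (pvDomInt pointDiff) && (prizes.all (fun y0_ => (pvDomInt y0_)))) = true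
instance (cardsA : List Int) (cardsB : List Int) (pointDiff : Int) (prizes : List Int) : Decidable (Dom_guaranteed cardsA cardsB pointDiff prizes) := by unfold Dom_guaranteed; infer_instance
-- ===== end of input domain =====

-- B drops A's quadratic table of slice re-sums: it accumulates only the two needed signed
-- prize sums in one enumerate pass over the sorted prizes (faster).


-- ===== PORT A =====
def guaranteed (cardsA : List Int) (cardsB : List Int) (pointDiff : Int) (prizes : List Int) : Int :=
  let cardsLeft : Int := (prizes.length : Int)
  let sorted_prizes := PySem.List.sorted prizes (fun x => x) true
  let guarantee := (PySem.List.pyRange 0 (cardsLeft + 1) 1).map (fun i =>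
      (PySem.List.slice sorted_prizes none (some i)).sum
      - (PySem.List.slice sorted_prizes (some i) none).sum)
  -- generator sums; cardsB[-1] / cardsA[-1] via pyGetD (default unused: Pre_ excludes the IndexError inputs)
  let guaranteeA : Int := (cardsA.map (fun card => if PySem.List.pyGetD cardsB (-1) 0 < card then (1:Int) else 0)).sum
  let guaranteeB : Int := (cardsB.map (fun card => if PySem.List.pyGetD cardsA (-1) 0 < card then (1:Int) else 0)).sum
  if PySem.List.pyGetD guarantee guaranteeA 0 + pointDiff > 0 then 1
  else if pointDiff - PySem.List.pyGetD guarantee guaranteeB 0 < 0 then -1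
  else 0

-- ===== PORT B =====
def guaranteed_alt (cardsA : List Int) (cardsB : List Int) (pointDiff : Int) (prizes : List Int) : Int :=
  let guaranteeA : Int := (cardsA.map (fun card => if PySem.List.pyGetD cardsB (-1) 0 < card then (1:Int) else 0)).sum
  let guaranteeB : Int := (cardsB.map (fun card => if PySem.List.pyGetD cardsA (-1) 0 < card then (1:Int) else 0)).sum
  -- valA = 0; valB = 0; for i, p in enumerate(sorted(prizes, reverse=True)): …
  let st := (PySem.List.enumerate (PySem.List.sorted prizes (fun x => x) true) 0).foldl
      (fun (st : Int × Int) ip =>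
        (st.1 + (if ip.1 < guaranteeA then ip.2 else -ip.2),
         st.2 + (if ip.1 < guaranteeB then ip.2 else -ip.2))) (0, 0)
  if st.1 + pointDiff > 0 then 1
  else if pointDiff - st.2 < 0 then -1
  else 0

-- ===== PRECONDITION & SPEC =====
-- Pre_ excludes exactly the inputs on which A raises IndexError: one side empty while the other
-- is not (cardsX[-1]), guaranteeA exceeding len(prizes), or — only when the first branch does not
-- already return 1 — guaranteeB exceeding len(prizes).
def Pre_guaranteed (cardsA : List Int) (cardsB : List Int) (pointDiff : Int) (prizes : List Int) : Prop :=
  let n : Int := (prizes.length : Int)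
  let gA : Int := (cardsA.map (fun card => if PySem.List.pyGetD cardsB (-1) 0 < card then (1:Int) else 0)).sum
  let gB : Int := (cardsB.map (fun card => if PySem.List.pyGetD cardsA (-1) 0 < card then (1:Int) else 0)).sum
  let sp := PySem.List.sorted prizes (fun x => x) true
  (cardsA = [] ↔ cardsB = []) ∧ gA ≤ n ∧
    (gB ≤ n ∨ 2 * ((sp.take gA.toNat).sum) - prizes.sum + pointDiff > 0)
instance (cardsA : List Int) (cardsB : List Int) (pointDiff : Int) (prizes : List Int) : Decidable (Pre_guaranteed cardsA cardsB pointDiff prizes) := by unfold Pre_guaranteed; infer_instance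

def pvWitness_guaranteed : List Int × List Int × Int × List Int := ([3, 1], [2, 2], 0, [5, 4])

def Spec_guaranteed (cardsA : List Int) (cardsB : List Int) (pointDiff : Int) (prizes : List Int) (out : Int) : Prop := out = guaranteed_alt cardsA cardsB pointDiff prizes
instance (cardsA : List Int) (cardsB : List Int) (pointDiff : Int) (prizes : List Int) (out : Int) : Decidable (Spec_guaranteed cardsA cardsB pointDiff prizes out) := by unfold Spec_guaranteed; infer_instance

-- ===== CLAIM (what is proved, stated in full; the proofs are below) =====
def Claim_equal_guaranteed : Prop := ∀ (cardsA : List Int) (cardsB : List Int) (pointDiff : Int) (prizes : List Int), Dom_guaranteed cardsA cardsB pointDiff prizes → Pre_guaranteed cardsA cardsB pointDiff prizes → Spec_guaranteed cardsA cardsB pointDiff prizes (guaranteed cardsA cardsB pointDiff prizes)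

-- ===== LEMMAS AND PROOFS =====

-- B's single pass computes, for each count k, the signed sum 2*(take k).sum - sum
theorem signed_fold_char (l : List Int) (kA kB s a b : Int) :
    (PySem.List.enumerate l s).foldl
      (fun (st : Int × Int) ip =>
        (st.1 + (if ip.1 < kA then ip.2 else -ip.2),
         st.2 + (if ip.1 < kB then ip.2 else -ip.2))) (a, b)
    = (a + 2 * (l.take (kA - s).toNat).sum - l.sum,
       b + 2 * (l.take (kB - s).toNat).sum - l.sum) := by
  induction l generalizing s a b with
  | nil => simp
  | cons p t ih =>
      rw [PySem.List.enumerate_cons, List.foldl_cons, ih]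
      have htake : ∀ (k : Int), ((p :: t).take (k - s).toNat).sum
          = (if s < k then p else 0) + (t.take (k - (s+1)).toNat).sum := by
        intro k
        by_cases h : s < k
        · have h1 : (k - s).toNat = (k - (s+1)).toNat + 1 := by omega
          simp [h1, h]
        · have h1 : (k - s).toNat = 0 := by omega
          have h2 : (k - (s+1)).toNat = 0 := by omega
          simp [h1, h2, h]
      refine Prod.ext ?_ ?_ <;> simp only [htake, List.sum_cons] <;> split <;> ring

theorem sum_take_add_sum_drop_int (l : List Int) (k : Nat) :
    (l.take k).sum + (l.drop k).sum = l.sum := by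
  rw [← List.sum_append, List.take_append_drop]

-- ===== VERDICT (by name: the statement is the Claim_ definition above) =====
theorem guaranteed_spec : Claim_equal_guaranteed := by
  intro cardsA cardsB pointDiff prizes _hdom hpre
  unfold Spec_guaranteed guaranteed guaranteed_alt
  dsimp only
  obtain ⟨_hab, hgA, hor⟩ := hpre
  set sp := PySem.List.sorted prizes (fun x => x) true with hsp
  have hlen : sp.length = prizes.length := PySem.List.length_sorted ..
  have hsum : sp.sum = prizes.sum := (PySem.List.sorted_perm ..).sum_eq
  set gA : Int := (cardsA.map (fun card => if PySem.List.pyGetD cardsB (-1) 0 < card then (1:Int) else 0)).sum with hgAdef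
  set gB : Int := (cardsB.map (fun card => if PySem.List.pyGetD cardsA (-1) 0 < card then (1:Int) else 0)).sum with hgBdef
  have nonneg : ∀ (xs : List Int) (t : Int),
      0 ≤ (xs.map (fun card => if t < card then (1:Int) else 0)).sum := by
    intro xs t
    apply List.sum_nonneg
    intro x hx
    simp only [List.mem_map] at hx
    obtain ⟨c, _, rfl⟩ := hx
    split <;> norm_num
  have hgA0 : 0 ≤ gA := nonneg ..
  have hgB0 : 0 ≤ gB := nonneg ..
  -- A's table lookup at 0 ≤ k ≤ n equals the signed sum 2*(take k).sum - sum
  have key : ∀ (k : Int), 0 ≤ k → k ≤ (prizes.length : Int) →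
      PySem.List.pyGetD ((PySem.List.pyRange 0 ((prizes.length : Int) + 1) 1).map (fun i =>
          (PySem.List.slice sp none (some i)).sum - (PySem.List.slice sp (some i) none).sum)) k 0
        = 2 * (sp.take k.toNat).sum - sp.sum := by
    intro k hk0 hkn
    rw [PySem.List.pyGetD_map_pyRange_of_nonneg _ _ _ _ hk0 (by omega),
        PySem.List.slice_to _ hk0, PySem.List.slice_from _ hk0]
    have := sum_take_add_sum_drop_int sp k.toNat
    omega
  rw [signed_fold_char]
  simp only [Int.sub_zero]
  rw [key gA hgA0 hgA, hsum]
  by_cases h1 : 2 * (sp.take gA.toNat).sum - prizes.sum + pointDiff > 0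
  · simp [h1]
  · have hgBn : gB ≤ (prizes.length : Int) := by
      rcases hor with h | h
      · exact h
      · exact absurd h h1
    rw [key gB hgB0 hgBn, hsum]
    simp only [zero_add]
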